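-- pv_equiv track=rewrite | github.com/ntopower2/leetcode | editor/en/1937MaximumNumberofPointswithCost.py | maxPoints
-- ===== SOURCE A (Python) =====
-- from typing import List
--
-- def maxPoints(points: List[List[int]]) -> int:
--     m, n = len(points), len(points[0])
--     dp = points[0]
--     left = [0 for _ in range(n)]
--     right = [0 for _ in range(n)]
--     for row in points[1:]:
--         left[0] = dp[0]
--         right[-1] = dp[-1]
--         for i in range(1, n):
--             left[i] = max(left[i - 1] - 1, dp[i])
--             right[-i - 1] = max(right[-i] - 1, dp[-i - 1])
--
--         dp = [val + max(l, r) for val, l, r in zip(row, left, right)]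
--     return max(dp)
-- ===== SOURCE B (Python) =====
-- from typing import List
--
-- def maxPoints(points: List[List[int]]) -> int:
--     n = len(points[0])
--     dp = points[0]
--     for row in points[1:]:
--         dp = [row[j] + max(dp[k] - abs(j - k) for k in range(n)) for j in range(n)]
--     return max(dp)
-- ===== Notes on version B (the rewrite author's own statement) =====
-- stated objective: simpler
-- what changed: Replaces A's prefix/suffix running-max auxiliary arrays (left/right, updated in place with negative indexing) by a direct nested scan: for each target column j of a row, scan every source column k of the previous dp row and take max(dp[k] - |j-k|), computing the DP recurrence literally with no auxiliary state.
-- outside the precondition, e.g. on maxPoints([[1, 2], [5]]): A returns 6, B raises IndexError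
import Mathlib
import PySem

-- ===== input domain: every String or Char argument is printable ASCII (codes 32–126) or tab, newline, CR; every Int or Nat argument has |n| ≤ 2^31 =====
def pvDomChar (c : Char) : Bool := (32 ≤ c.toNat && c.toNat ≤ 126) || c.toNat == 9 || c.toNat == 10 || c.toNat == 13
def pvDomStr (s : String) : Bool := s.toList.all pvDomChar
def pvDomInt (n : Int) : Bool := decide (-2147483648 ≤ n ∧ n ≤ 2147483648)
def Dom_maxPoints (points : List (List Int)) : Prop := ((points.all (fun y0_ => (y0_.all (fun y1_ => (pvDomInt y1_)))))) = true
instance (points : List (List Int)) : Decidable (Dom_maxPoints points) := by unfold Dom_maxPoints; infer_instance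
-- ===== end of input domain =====

-- B replaces A's prefix/suffix running-max arrays by a direct O(m·n²) scan: for each target
-- column it scans every source column of the previous row, subtracting the column distance
-- (objective: simpler — same DP, no auxiliary arrays).

-- ===== PORT A =====
def pvStepA (n : Nat) (dp row : List Int) : List Int :=
  let left0 := PySem.List.pySetD (List.replicate n (0:Int)) 0 (PySem.List.pyGetD dp 0 0)
  let right0 := PySem.List.pySetD (List.replicate n (0:Int)) (-1) (PySem.List.pyGetD dp (-1) 0)
  let lr := (PySem.List.pyRange 1 (n:Int) 1).foldl
    (fun (lr : List Int × List Int) i =>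
      (PySem.List.pySetD lr.1 i (max (PySem.List.pyGetD lr.1 (i-1) 0 - 1) (PySem.List.pyGetD dp i 0)),
       PySem.List.pySetD lr.2 (-i-1) (max (PySem.List.pyGetD lr.2 (-i) 0 - 1) (PySem.List.pyGetD dp (-i-1) 0))))
    (left0, right0)
  (row.zip (lr.1.zip lr.2)).map (fun t => t.1 + max t.2.1 t.2.2)

def maxPoints (points : List (List Int)) : Int :=
  let n := (points.headD []).length
  let dp := (PySem.List.slice points (some 1) none).foldl (pvStepA n) (points.headD [])
  (PySem.List.max? dp (fun y => y)).getD 0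

-- ===== PORT B =====
def pvBest (n : Nat) (dp : List Int) (j : Int) : Int :=
  (PySem.List.pyRange 1 (n:Int) 1).foldl
    (fun best k => max best (PySem.List.pyGetD dp k 0 - ((j - k).natAbs : Int)))
    (PySem.List.pyGetD dp 0 0 - j)

def pvStepB (n : Nat) (dp row : List Int) : List Int :=
  (PySem.List.pyRange 0 (n:Int) 1).map (fun j => PySem.List.pyGetD row j 0 + pvBest n dp j)

def maxPoints_alt (points : List (List Int)) : Int :=
  let n := (points.headD []).length
  let dp := (PySem.List.slice points (some 1) none).foldl (pvStepB n) (points.headD [])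
  (PySem.List.max? dp (fun y => y)).getD 0

-- ===== PRECONDITION & SPEC =====
-- Pre_ excludes the empty grid and an empty first row (A raises IndexError/ValueError there) and
-- grids with a row shorter than the first row, where A either raises (short inner row) or, for a
-- short last row, returns an accidental value of zip truncation.
def Pre_maxPoints (points : List (List Int)) : Prop :=
  points ≠ [] ∧ (points.headD []) ≠ [] ∧ ∀ row ∈ points, (points.headD []).length ≤ row.length
instance (points : List (List Int)) : Decidable (Pre_maxPoints points) := by unfold Pre_maxPoints; infer_instance
def pvWitness_maxPoints : List (List Int) := [[1, 2, 3], [1, 5, 1], [3, 1, 1]]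

def Spec_maxPoints (points : List (List Int)) (out : Int) : Prop := out = maxPoints_alt points
instance (points : List (List Int)) (out : Int) : Decidable (Spec_maxPoints points out) := by unfold Spec_maxPoints; infer_instance

-- ===== CLAIM (what is proved, stated in full; the proofs are below) =====
def Claim_equal_maxPoints : Prop := ∀ (points : List (List Int)), Dom_maxPoints points → Pre_maxPoints points → Spec_maxPoints points (maxPoints points)

-- ===== LEMMAS AND PROOFS =====

-- max of f 0, …, f n
def pvBigMax (f : Nat → Int) : Nat → Int
  | 0 => f 0
  | n + 1 => max (pvBigMax f n) (f (n + 1))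

theorem pvBigMax_congr (f g : Nat → Int) (n : Nat) (h : ∀ k, k ≤ n → f k = g k) :
    pvBigMax f n = pvBigMax g n := by
  induction n with
  | zero => simpa using h 0 (by omega)
  | succ m ih =>
      simp only [pvBigMax]
      rw [ih (fun k hk => h k (by omega)), h (m+1) (by omega)]

theorem pvBigMax_sub (f : Nat → Int) (c : Int) (n : Nat) :
    pvBigMax (fun k => f k - c) n = pvBigMax f n - c := by
  induction n with
  | zero => simp [pvBigMax]
  | succ m ih => simp only [pvBigMax, ih]; rw [Int.sub_max_sub_right]

theorem pvBigMax_le_iff (f : Nat → Int) (n : Nat) (x : Int) :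
    pvBigMax f n ≤ x ↔ ∀ k, k ≤ n → f k ≤ x := by
  induction n with
  | zero =>
      simp only [pvBigMax]
      constructor
      · intro h k hk
        obtain rfl : k = 0 := by omega
        exact h
      · intro h; exact h 0 (by omega)
  | succ m ih =>
      simp only [pvBigMax, max_le_iff, ih]
      constructor
      · rintro ⟨h1, h2⟩ k hk
        rcases Nat.lt_or_ge k (m+1) with h | h
        · exact h1 k (by omega)
        · have : k = m + 1 := by omega
          simpa [this] using h2
      · intro h; exact ⟨fun k hk => h k (by omega), h (m+1) (by omega)⟩

theorem le_pvBigMax (f : Nat → Int) (n k : Nat) (hk : k ≤ n) : f k ≤ pvBigMax f n := by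
  induction n with
  | zero =>
      obtain rfl : k = 0 := by omega
      simp [pvBigMax]
  | succ m ih =>
      simp only [pvBigMax]
      rcases Nat.lt_or_ge k (m+1) with h | h
      · exact le_max_of_le_left (ih (by omega))
      · have : k = m + 1 := by omega
        simp [this]

theorem pvBigMax_cons (f : Nat → Int) (n : Nat) :
    pvBigMax f (n + 1) = max (f 0) (pvBigMax (fun t => f (t + 1)) n) := by
  induction n with
  | zero => simp [pvBigMax]
  | succ m ih =>
      calc pvBigMax f (m + 1 + 1) = max (pvBigMax f (m+1)) (f (m+2)) := rfl
        _ = max (max (f 0) (pvBigMax (fun t => f (t+1)) m)) (f (m+2)) := by rw [ih]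
        _ = max (f 0) (max (pvBigMax (fun t => f (t+1)) m) (f (m+2))) := by rw [max_assoc]
        _ = max (f 0) (pvBigMax (fun t => f (t+1)) (m+1)) := rfl

theorem pvBigMax_merge (f : Nat → Int) (n j : Nat) (hj : j ≤ n) :
    max (pvBigMax f j) (pvBigMax (fun t => f (j + t)) (n - j)) = pvBigMax f n := by
  apply le_antisymm
  · apply max_le
    · rw [pvBigMax_le_iff]; intro k hk; exact le_pvBigMax f n k (by omega)
    · rw [pvBigMax_le_iff]; intro k hk; exact le_pvBigMax f n (j + k) (by omega)
  · rw [pvBigMax_le_iff]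
    intro k hk
    rcases Nat.lt_or_ge j k with h | h
    · refine le_max_of_le_right ?_
      have : f k = (fun t => f (j + t)) (k - j) := by congr 1; omega
      rw [this]
      exact le_pvBigMax _ (n - j) (k - j) (by omega)
    · exact le_max_of_le_left (le_pvBigMax f j k (by omega))

-- the candidate value of source column k for target column j
def pvG (dp : List Int) (j k : Nat) : Int := dp.getD k 0 - (((j:Int) - (k:Int)).natAbs : Int)

-- prefix running max:  Lspec dp j = max_{k ≤ j} (dp[k] - (j - k))
def pvLspec (dp : List Int) (j : Nat) : Int := pvBigMax (fun k => dp.getD k 0 - ((j:Int) - (k:Int))) j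
-- suffix running max:  Rspec dp j = max_{j ≤ k < n} (dp[k] - (k - j))
def pvRspec (dp : List Int) (j : Nat) : Int := pvBigMax (fun t => dp.getD (j + t) 0 - (t:Int)) (dp.length - 1 - j)

theorem pvLspec_rec (dp : List Int) (i : Nat) (hi : 1 ≤ i) :
    pvLspec dp i = max (pvLspec dp (i - 1) - 1) (dp.getD i 0) := by
  obtain ⟨i', rfl⟩ : ∃ i', i = i' + 1 := ⟨i - 1, by omega⟩
  simp only [pvLspec, pvBigMax, Nat.add_sub_cancel]
  congr 1
  · rw [← pvBigMax_sub]
    apply pvBigMax_congr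
    intro k hk
    push_cast; ring
  · push_cast; ring

theorem pvRspec_rec (dp : List Int) (j : Nat) (hj : j + 1 < dp.length) :
    pvRspec dp j = max (pvRspec dp (j + 1) - 1) (dp.getD j 0) := by
  simp only [pvRspec]
  have h1 : dp.length - 1 - j = (dp.length - 1 - (j + 1)) + 1 := by omega
  rw [h1, pvBigMax_cons, max_comm]
  congr 1
  · rw [← pvBigMax_sub]
    apply pvBigMax_congr
    intro k hk
    have : j + (k + 1) = j + 1 + k := by omega
    rw [this]; push_cast; ring
  · simp

theorem pvL_eq_G (dp : List Int) (j : Nat) : pvLspec dp j = pvBigMax (pvG dp j) j := by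
  apply pvBigMax_congr
  intro k hk
  simp only [pvG]
  congr 1
  omega

theorem pvR_eq_G (dp : List Int) (j : Nat) :
    pvRspec dp j = pvBigMax (fun t => pvG dp j (j + t)) (dp.length - 1 - j) := by
  apply pvBigMax_congr
  intro k hk
  simp only [pvG]
  congr 1
  omega

theorem pvLR_merge (dp : List Int) (j : Nat) (hj : j < dp.length) :
    max (pvLspec dp j) (pvRspec dp j) = pvBigMax (pvG dp j) (dp.length - 1) := by
  rw [pvL_eq_G, pvR_eq_G]
  have h : dp.length - 1 - j = (dp.length - 1) - j := by omega
  rw [h, pvBigMax_merge (pvG dp j) (dp.length - 1) j (by omega)]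

-- negative-index write (derived fact about the PySem primitive, used by the right-array loop)
theorem pvSetD_neg_natCast (xs : List Int) (k : Nat) (v : Int) (h1 : 0 < k) (h2 : k ≤ xs.length) :
    PySem.List.pySetD xs (-(k:Int)) v = xs.set (xs.length - k) v := by
  unfold PySem.List.pySetD PySem.List.pySet? PySem.List.pyIdx?
  split_ifs with h3 h4 <;> simp <;> [skip; omega; omega]
  congr 1; omega

-- the two inner loops of A, split apart
def pvFL (dp : List Int) (l : List Int) (i : Int) : List Int :=
  PySem.List.pySetD l i (max (PySem.List.pyGetD l (i-1) 0 - 1) (PySem.List.pyGetD dp i 0))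
def pvFR (dp : List Int) (r : List Int) (i : Int) : List Int :=
  PySem.List.pySetD r (-i-1) (max (PySem.List.pyGetD r (-i) 0 - 1) (PySem.List.pyGetD dp (-i-1) 0))

theorem pvGetD_set_ne (l : List Int) (i t : Nat) (v : Int) (h : t ≠ i) :
    (l.set i v).getD t 0 = l.getD t 0 := by
  simp [List.getD, List.getElem?_set_ne (Ne.symm h)]

theorem pvGetD_set_self (l : List Int) (i : Nat) (v : Int) (h : i < l.length) :
    (l.set i v).getD i 0 = v := by
  simp [List.getD, h]

theorem pvLeftFold (dp : List Int) :
    ∀ (m i : Nat) (l : List Int), 1 ≤ i → i + m = dp.length → l.length = dp.length →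
    (∀ t, t < i → l.getD t 0 = pvLspec dp t) →
    ∀ j, j < dp.length →
      ((PySem.List.pyRange (i:Int) (dp.length:Int) 1).foldl (pvFL dp) l).getD j 0 = pvLspec dp j := by
  intro m
  induction m with
  | zero =>
      intro i l hi hsum hlen hinv j hj
      rw [PySem.List.pyRange_one_eq_nil (by exact_mod_cast (by omega : dp.length ≤ i))]
      exact hinv j (by omega)
  | succ m ih =>
      intro i l hi hsum hlen hinv j hj
      have hilt : i < dp.length := by omega
      rw [PySem.List.pyRange_one_cons (by exact_mod_cast hilt)]
      simp only [List.foldl]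
      have hv : pvFL dp l (i:Int) = l.set i (pvLspec dp i) := by
        unfold pvFL
        have h1 : (i:Int) - 1 = ((i-1:Nat):Int) := by omega
        rw [h1]
        simp only [PySem.List.pySetD_natCast, PySem.List.pyGetD_natCast]
        rw [hinv (i-1) (by omega), ← pvLspec_rec dp i hi]
      rw [show ((i:Int) + 1) = ((i+1 : Nat) : Int) by push_cast; ring, hv]
      apply ih (i+1) _ (by omega) (by omega) (by simp [hlen]) _ j hj
      intro t ht
      by_cases hti : t = i
      · subst hti
        rw [pvGetD_set_self _ _ _ (by omega)]
      · rw [pvGetD_set_ne _ _ _ _ hti]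
        exact hinv t (by omega)

theorem pvRightFold (dp : List Int) :
    ∀ (m i : Nat) (r : List Int), 1 ≤ i → i + m = dp.length → r.length = dp.length →
    (∀ t, dp.length - i ≤ t → t < dp.length → r.getD t 0 = pvRspec dp t) →
    ∀ j, j < dp.length →
      ((PySem.List.pyRange (i:Int) (dp.length:Int) 1).foldl (pvFR dp) r).getD j 0 = pvRspec dp j := by
  intro m
  induction m with
  | zero =>
      intro i r hi hsum hlen hinv j hj
      rw [PySem.List.pyRange_one_eq_nil (by exact_mod_cast (by omega : dp.length ≤ i))]
      exact hinv j (by omega) hj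
  | succ m ih =>
      intro i r hi hsum hlen hinv j hj
      have hilt : i < dp.length := by omega
      rw [PySem.List.pyRange_one_cons (by exact_mod_cast hilt)]
      simp only [List.foldl]
      have hv : pvFR dp r (i:Int) =
          r.set (dp.length - (i+1)) (pvRspec dp (dp.length - (i+1))) := by
        unfold pvFR
        have e1 : -(i:Int) - 1 = -((i+1:Nat):Int) := by push_cast; ring
        rw [e1, pvSetD_neg_natCast r (i+1) _ (by omega) (by omega)]
        rw [PySem.List.pyGetD_neg_natCast r i 0 (by omega) (by omega)]
        rw [PySem.List.pyGetD_neg_natCast dp (i+1) 0 (by omega) (by omega)]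
        have hr1 : r.length - (i+1) = dp.length - (i+1) := by omega
        have hr2 : r.length - i = dp.length - i := by omega
        simp only [hr1, hr2]
        congr 1
        rw [← List.getD_eq_getElem r 0 (by omega), ← List.getD_eq_getElem dp 0 (by omega)]
        rw [hinv (dp.length - i) (by omega) (by omega)]
        rw [show dp.length - i = dp.length - (i+1) + 1 from by omega]
        exact (pvRspec_rec dp (dp.length - (i+1)) (by omega)).symm
      rw [show ((i:Int) + 1) = ((i+1 : Nat) : Int) by push_cast; ring, hv]
      apply ih (i+1) _ (by omega) (by omega) (by simp [hlen]) _ j hj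
      intro t ht1 ht2
      by_cases hti : t = dp.length - (i+1)
      · subst hti
        rw [pvGetD_set_self _ _ _ (by omega)]
      · rw [pvGetD_set_ne _ _ _ _ hti]
        exact hinv t (by omega) ht2

theorem pvFoldLen {F : List Int → Int → List Int}
    (hF : ∀ l i, (F l i).length = l.length) (ks : List Int) (l : List Int) :
    (ks.foldl F l).length = l.length := by
  induction ks generalizing l with
  | nil => rfl
  | cons k ks ih => simp [List.foldl, ih, hF]

-- B's inner scan computes the full max of the candidates
theorem pvFoldMaxRange (H : Int → Int) : ∀ (n : Nat) (c : Int),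
    (PySem.List.pyRange 1 ((n:Int) + 1) 1).foldl (fun a k => max a (H k)) c =
      pvBigMax (fun t => if t = 0 then c else H (t:Int)) n := by
  intro n
  induction n with
  | zero => intro c; simp [PySem.List.pyRange_one_eq_nil, pvBigMax]
  | succ m ih =>
      intro c
      have h : ((m:Int) + 1 + 1) = ((m:Int) + 1) + 1 := by ring
      rw [show (((m+1:Nat)):Int) = ((m:Int)+1) by push_cast; ring, h,
        PySem.List.pyRange_one_succ_right (by omega), List.foldl_append]
      simp only [List.foldl]
      rw [ih]
      simp only [pvBigMax]
      congr 1

theorem pvBest_eq (n : Nat) (dp : List Int) (j : Nat) (_hn : dp.length = n) (h1 : 1 ≤ n) :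
    pvBest n dp (j:Int) = pvBigMax (pvG dp j) (n - 1) := by
  obtain ⟨m, hm⟩ : ∃ m, n = m + 1 := ⟨n - 1, by omega⟩
  unfold pvBest
  rw [hm, show (((m + 1 : Nat)):Int) = (m:Int) + 1 from by push_cast; ring,
    pvFoldMaxRange]
  rw [show m = n - 1 from by omega]
  apply pvBigMax_congr
  intro k hk
  by_cases hk0 : k = 0
  · subst hk0
    simp [pvG, PySem.List.pyGetD_zero]
  · simp only [hk0, if_false, pvG, PySem.List.pyGetD_natCast]

theorem pvFL_len (dp l : List Int) (i : Int) : (pvFL dp l i).length = l.length := by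
  unfold pvFL; exact PySem.List.length_pySetD _ _ _

theorem pvFR_len (dp r : List Int) (i : Int) : (pvFR dp r i).length = r.length := by
  unfold pvFR; exact PySem.List.length_pySetD _ _ _

theorem pvStep_eq (n : Nat) (dp row : List Int) (hn : dp.length = n) (hr : n ≤ row.length)
    (h1 : 1 ≤ n) : pvStepA n dp row = pvStepB n dp row := by
  subst hn
  have hdp : dp ≠ [] := by intro h; rw [h] at h1; simp at h1
  have hfun : (fun (lr : List Int × List Int) (i : Int) =>
      (PySem.List.pySetD lr.1 i (max (PySem.List.pyGetD lr.1 (i-1) 0 - 1) (PySem.List.pyGetD dp i 0)),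
       PySem.List.pySetD lr.2 (-i-1) (max (PySem.List.pyGetD lr.2 (-i) 0 - 1) (PySem.List.pyGetD dp (-i-1) 0))))
      = (fun (lr : List Int × List Int) (i : Int) => (pvFL dp lr.1 i, pvFR dp lr.2 i)) := rfl
  have hl0 : PySem.List.pySetD (List.replicate dp.length (0:Int)) 0 (PySem.List.pyGetD dp 0 0)
      = (List.replicate dp.length (0:Int)).set 0 (dp.getD 0 0) := by
    rw [PySem.List.pyGetD_zero, show (0:Int) = ((0:Nat):Int) from rfl, PySem.List.pySetD_natCast]
  have hr0 : PySem.List.pySetD (List.replicate dp.length (0:Int)) (-1) (PySem.List.pyGetD dp (-1) 0)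
      = (List.replicate dp.length (0:Int)).set (dp.length - 1) (dp.getD (dp.length - 1) 0) := by
    rw [PySem.List.pyGetD_neg_one _ _ hdp,
      show (-1:Int) = -((1:Nat):Int) from rfl,
      pvSetD_neg_natCast (List.replicate dp.length (0:Int)) 1 _ (by omega) (by simp; omega)]
    simp [List.getLast_eq_getElem, List.getD,
      List.getElem?_eq_getElem (show dp.length - 1 < dp.length from by omega)]
  rw [pvStepA, hfun, hl0, hr0, PySem.List.foldl_prod_mk (pvFL dp) (pvFR dp)]
  set L := (PySem.List.pyRange 1 (dp.length:Int) 1).foldl (pvFL dp)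
      ((List.replicate dp.length (0:Int)).set 0 (dp.getD 0 0)) with hLdef
  set R := (PySem.List.pyRange 1 (dp.length:Int) 1).foldl (pvFR dp)
      ((List.replicate dp.length (0:Int)).set (dp.length - 1) (dp.getD (dp.length - 1) 0)) with hRdef
  have hLlen : L.length = dp.length := by
    rw [hLdef, pvFoldLen (fun l i => pvFL_len dp l i)]; simp
  have hRlen : R.length = dp.length := by
    rw [hRdef, pvFoldLen (fun l i => pvFR_len dp l i)]; simp
  have hL : ∀ j, j < dp.length → L.getD j 0 = pvLspec dp j := by
    intro j hj
    refine pvLeftFold dp (dp.length - 1) 1 _ (by omega) (by omega) (by simp) ?_ j hj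
    intro t ht
    obtain rfl : t = 0 := by omega
    rw [pvGetD_set_self _ _ _ (by simp; omega)]
    simp [pvLspec, pvBigMax]
  have hR : ∀ j, j < dp.length → R.getD j 0 = pvRspec dp j := by
    intro j hj
    refine pvRightFold dp (dp.length - 1) 1 _ (by omega) (by omega) (by simp) ?_ j hj
    intro t ht1 ht2
    obtain rfl : t = dp.length - 1 := by omega
    rw [pvGetD_set_self _ _ _ (by simp; omega)]
    simp [pvRspec, pvBigMax]
  apply List.ext_getElem
  · simp [pvStepB, hLlen, hRlen, PySem.List.length_pyRange_one]
    omega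
  · intro j hj1 hj2
    have hjn : j < dp.length := by
      simp [hLlen, hRlen] at hj1
      omega
    simp only [pvStepB, List.getElem_map, List.getElem_zip, PySem.List.getElem_pyRange_one,
      zero_add]
    rw [show ((j:Int)) = ((j:Nat):Int) from rfl, PySem.List.pyGetD_natCast,
      pvBest_eq dp.length dp j rfl h1]
    rw [List.getD_eq_getElem row 0 (by omega)]
    rw [← List.getD_eq_getElem L 0 (by omega), ← List.getD_eq_getElem R 0 (by omega)]
    rw [hL j hjn, hR j hjn, pvLR_merge dp j hjn]

theorem pvStepB_len (n : Nat) (dp row : List Int) : (pvStepB n dp row).length = n := by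
  rw [pvStepB, List.length_map, PySem.List.length_pyRange_one]
  omega

theorem pvOuter (n : Nat) (hn : 1 ≤ n) :
    ∀ (rest : List (List Int)) (dp : List Int), dp.length = n → (∀ r ∈ rest, n ≤ r.length) →
      rest.foldl (pvStepA n) dp = rest.foldl (pvStepB n) dp := by
  intro rest
  induction rest with
  | nil => intro dp _ _; rfl
  | cons r rest ih =>
      intro dp hdp hr
      simp only [List.foldl]
      rw [pvStep_eq n dp r hdp (hr r (by simp)) hn]
      exact ih (pvStepB n dp r) (pvStepB_len n dp r)
        (fun x hx => hr x (by simp [hx]))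

-- ===== VERDICT (by name: the statement is the Claim_ definition above) =====
theorem maxPoints_spec : Claim_equal_maxPoints := by
  intro points hdom hpre
  obtain ⟨hne, hhead, hrows⟩ := hpre
  obtain ⟨p0, rest, rfl⟩ : ∃ p0 rest, points = p0 :: rest := by
    cases points with
    | nil => exact absurd rfl hne
    | cons a b => exact ⟨a, b, rfl⟩
  unfold Spec_maxPoints maxPoints maxPoints_alt
  simp only [List.headD_cons] at hhead hrows ⊢
  rw [PySem.List.slice_from_one]
  simp only [List.tail_cons]
  rw [pvOuter p0.length (by cases p0 <;> simp_all) rest p0 rfl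
    (fun r hr => hrows r (by simp [hr]))]
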